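-- pv_equiv track=rewrite | github.com/devopsmay24batch/mydevopsrepo | crobot/common/diag/DiagLib.py | get_formated_mac_address
-- ===== SOURCE A (Python) =====
-- def get_formated_mac_address(mac_addr):
--     mac_add=mac_addr.upper()
--     formatted_mac=""
--     for ind in range(len(mac_add)):
--       formatted_mac+=mac_add[ind]
--       if ind%2 and ind!=len(mac_add)-1:
--           formatted_mac+="-"
--     return formatted_mac
-- ===== SOURCE B (Python) =====
-- def get_formated_mac_address(mac_addr):
--     mac = mac_addr.upper()
--     return "-".join(mac[i:i + 2] for i in range(0, len(mac), 2))
-- ===== Notes on version B (the rewrite author's own statement) =====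
-- stated objective: idiomatic
-- what changed: Replaces the per-character accumulation loop with its index-parity/last-index delimiter guard by slicing the uppercased string into 2-character chunks (step-2 range) and joining the chunks with the dash separator.
import Mathlib
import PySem

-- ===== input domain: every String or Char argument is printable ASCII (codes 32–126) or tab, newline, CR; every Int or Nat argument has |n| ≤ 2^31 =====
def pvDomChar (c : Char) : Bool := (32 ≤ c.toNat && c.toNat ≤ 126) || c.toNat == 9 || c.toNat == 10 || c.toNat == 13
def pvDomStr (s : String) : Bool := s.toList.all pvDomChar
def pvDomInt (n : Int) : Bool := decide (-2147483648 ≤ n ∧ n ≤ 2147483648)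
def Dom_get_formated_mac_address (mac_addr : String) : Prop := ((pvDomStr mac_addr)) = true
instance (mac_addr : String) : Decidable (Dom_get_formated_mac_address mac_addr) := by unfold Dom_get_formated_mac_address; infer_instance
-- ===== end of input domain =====

-- B replaces A's per-character loop (dash appended on odd index except the last) by
-- uppercase, slice into 2-char chunks with a step-2 range, and '-'.join (idiomatic).

-- ===== PORT A =====
-- per-character loop: formatted_mac += mac_add[ind]; dash when ind is odd and not last
def get_formated_mac_address (mac_addr : String) : String :=
  let mac_add : List Char := (PySem.Str.upper mac_addr).toList
  let formatted_mac : List Char :=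
    (PySem.List.pyRange 0 (mac_add.length : Int) 1).foldl
      (fun acc ind =>
        let acc := acc ++ [PySem.List.pyGetD mac_add ind ' ']   -- index always in range
        if PySem.Int.mod ind 2 ≠ 0 ∧ ind ≠ (mac_add.length : Int) - 1 then acc ++ ['-'] else acc)
      []
  String.ofList formatted_mac

-- ===== PORT B =====
-- "-".join(mac[i:i+2] for i in range(0, len(mac), 2))
def get_formated_mac_address_alt (mac_addr : String) : String :=
  let mac : List Char := (PySem.Str.upper mac_addr).toList
  let chunks : List (List Char) :=
    (PySem.List.pyRange 0 (mac.length : Int) 2).map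
      (fun i => PySem.List.slice mac (some i) (some (i + 2)))
  String.ofList (PySem.Chars.join ['-'] chunks)

-- ===== PRECONDITION & SPEC =====
def Spec_get_formated_mac_address (mac_addr : String) (out : String) : Prop := out = get_formated_mac_address_alt mac_addr
instance (mac_addr : String) (out : String) : Decidable (Spec_get_formated_mac_address mac_addr out) := by unfold Spec_get_formated_mac_address; infer_instance

-- ===== CLAIM (what is proved, stated in full; the proofs are below) =====
def Claim_equal_get_formated_mac_address : Prop := ∀ (mac_addr : String), Dom_get_formated_mac_address mac_addr → Spec_get_formated_mac_address mac_addr (get_formated_mac_address mac_addr)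

-- ===== LEMMAS AND PROOFS =====

-- A's per-index contribution, on Nat indices
def pvH (cs : List Char) (k : Nat) : List Char :=
  cs.getD k ' ' :: (if k % 2 = 1 ∧ k + 1 ≠ cs.length then ['-'] else [])

-- B's chunk list, on Nat indices
def pvChunks (cs : List Char) : List (List Char) :=
  (List.range ((cs.length + 1) / 2)).map (fun k => (cs.drop (2 * k)).take 2)

theorem pvChunks_ne_nil (c : Char) (rs : List Char) : pvChunks (c :: rs) ≠ [] := by
  simp [pvChunks]

-- the core equality, by two-step structural induction
theorem pvMain : ∀ (cs : List Char),
    (List.range cs.length).flatMap (pvH cs) = PySem.Chars.join ['-'] (pvChunks cs)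
  | [] => by simp [pvChunks, PySem.Chars.join_nil]
  | [a] => by
      simp [pvChunks, pvH, List.range_succ, PySem.Chars.join_singleton]
  | a :: b :: rest => by
      have IH := pvMain rest
      have hn : (a :: b :: rest).length = 2 + rest.length := by simp; omega
      have hshift : ∀ k : Nat, pvH (a :: b :: rest) (2 + k) = pvH rest k := by
        intro k
        have : 2 + k = k + 2 := by omega
        simp only [pvH, this, List.getD_cons_succ, List.length_cons]
        congr 1
        have h1 : (k + 2) % 2 = k % 2 := by omega
        have h2 : (k + 2 + 1 ≠ rest.length + 1 + 1) ↔ (k + 1 ≠ rest.length) := by omega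
        simp [h1, h2]
      have hLHS : (List.range (a :: b :: rest).length).flatMap (pvH (a :: b :: rest))
          = pvH (a :: b :: rest) 0 ++ pvH (a :: b :: rest) 1
            ++ (List.range rest.length).flatMap (pvH rest) := by
        rw [hn, List.range_add]
        simp only [List.flatMap_append, List.flatMap_map]
        have : List.range 2 = [0, 1] := by decide
        rw [this]
        simp only [List.flatMap_cons, List.flatMap_nil, List.append_nil, List.append_assoc]
        congr 2
        exact List.flatMap_congr (fun k _ => hshift k)
      have hchunks : pvChunks (a :: b :: rest) = [a, b] :: pvChunks rest := by
        have hlen : ((a :: b :: rest).length + 1) / 2 = 1 + (rest.length + 1) / 2 := by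
          simp; omega
        simp only [pvChunks, hlen, List.range_add, List.map_append, List.map_map]
        rw [show List.range 1 = [0] by decide]
        simp only [List.map_cons, List.map_nil, List.singleton_append]
        congr 1
        apply List.map_congr_left
        intro k _
        have h2k : 2 * (1 + k) = 2 * k + 2 := by omega
        simp [Function.comp, h2k, List.drop_succ_cons]
      rw [hLHS, hchunks]
      cases rest with
      | nil => simp [pvH, PySem.Chars.join_singleton, pvChunks]
      | cons c rs =>
          obtain ⟨q, more, hq⟩ := List.exists_cons_of_ne_nil (pvChunks_ne_nil c rs)
          rw [hq, PySem.Chars.join_cons_cons, ← hq, ← IH]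
          simp [pvH]

-- A's fold is the flatMap of pvH
theorem pvAside (cs : List Char) :
    (PySem.List.pyRange 0 (cs.length : Int) 1).foldl
      (fun acc ind =>
        let acc := acc ++ [PySem.List.pyGetD cs ind ' ']
        if PySem.Int.mod ind 2 ≠ 0 ∧ ind ≠ (cs.length : Int) - 1 then acc ++ ['-'] else acc)
      []
    = (List.range cs.length).flatMap (pvH cs) := by
  rw [PySem.List.pyRange_one]
  have hb : ((cs.length : Int) - 0).toNat = cs.length := by omega
  rw [hb, List.foldl_map]
  have hbody : (fun (acc : List Char) (k : Nat) =>
      (fun acc ind =>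
        let acc := acc ++ [PySem.List.pyGetD cs ind ' ']
        if PySem.Int.mod ind 2 ≠ 0 ∧ ind ≠ (cs.length : Int) - 1 then acc ++ ['-'] else acc)
        acc ((0 : Int) + (k : Int)))
      = fun acc k => acc ++ pvH cs k := by
    funext acc k
    simp only [zero_add, PySem.List.pyGetD_natCast, pvH]
    have hmod : PySem.Int.mod (k : Int) 2 ≠ 0 ↔ k % 2 = 1 := by
      simp [PySem.Int.mod, Int.fmod_eq_emod]
      omega
    have hlast : ((k : Int) ≠ (cs.length : Int) - 1) ↔ (k + 1 ≠ cs.length) := by omega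
    rw [if_congr (and_congr hmod hlast) rfl rfl]
    split_ifs <;> simp
  rw [hbody, PySem.List.foldl_append_eq_flatMap]
  simp

-- B's chunk comprehension is pvChunks
theorem pvBside (cs : List Char) :
    (PySem.List.pyRange 0 (cs.length : Int) 2).map
      (fun i => PySem.List.slice cs (some i) (some (i + 2)))
    = pvChunks cs := by
  rw [PySem.List.pyRange_of_pos 0 (cs.length : Int) (by norm_num)]
  have hcnt : (if (0 : Int) < (cs.length : Int)
      then (((cs.length : Int) - 0 + 2 - 1) / 2).toNat else 0) = (cs.length + 1) / 2 := by
    split_ifs with h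
    · omega
    · omega
  rw [hcnt, List.map_map, pvChunks]
  apply List.map_congr_left
  intro k _
  simp only [Function.comp_apply]
  rw [show ((0 : Int) + 2 * (k : Int)) = ((2 * k : Nat) : Int) by push_cast; ring]
  rw [show (((2 * k : Nat) : Int) + 2) = ((2 * k + 2 : Nat) : Int) by push_cast; ring]
  rw [PySem.List.slice_natCast]
  congr 1
  omega

-- ===== VERDICT (by name: the statement is the Claim_ definition above) =====
theorem get_formated_mac_address_spec : Claim_equal_get_formated_mac_address := by
  intro mac_addr _
  unfold Spec_get_formated_mac_address get_formated_mac_address get_formated_mac_address_alt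
  simp only []
  rw [pvAside, pvBside, pvMain]
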